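-- pv_equiv track=rewrite | github.com/vitalii-novikov/Graph_Neural_Network_for_Market_Microstructure | TGNN2026/baseGNN1.py | build_exact_cover_dilations
-- ===== SOURCE A (Python) =====
-- from typing import Any, Dict, Iterable, List, Optional, Sequence, Tuple
--
-- def build_exact_cover_dilations(lookback_bars: int, kernel_size: int) -> List[int]:
--     """
--     For kernel size 2, receptive field is:
--         RF = 1 + sum(dilations)
--     We construct a greedy ascending schedule that exactly covers the lookback.
--     This removes the old mismatch between nominal lookback and effective RF.
--     """
--     if int(kernel_size) != 2:
--         raise ValueError("This exact-coverage schedule is implemented for kernel_size=2 only.")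
--     if int(lookback_bars) < 2:
--         raise ValueError("lookback_bars must be at least 2")
--
--     remaining = int(lookback_bars) - 1
--     dilations: List[int] = []
--     d = 1
--     while remaining > 0:
--         if d < remaining:
--             dilations.append(d)
--             remaining -= d
--             d *= 2
--         else:
--             dilations.append(remaining)
--             remaining = 0
--     return dilations
-- ===== SOURCE B (Python) =====
-- def build_exact_cover_dilations(lookback_bars, kernel_size):
--     if int(kernel_size) != 2:
--         raise ValueError("This exact-coverage schedule is implemented for kernel_size=2 only.")
--     if int(lookback_bars) < 2:
--         raise ValueError("lookback_bars must be at least 2")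
--     R = int(lookback_bars) - 1
--     m = R.bit_length() - 1
--     return [2 ** i for i in range(m)] + [R - (2 ** m - 1)]
-- ===== Notes on version B (the rewrite author's own statement) =====
-- stated objective: simpler
-- what changed: Replaces the greedy while-loop over (remaining, d) by a closed form: m = (lookback_bars-1).bit_length()-1 gives the number of full doubling steps, so B emits the powers 2^0..2^(m-1) directly and appends the single remainder term (lookback_bars-1) - (2^m - 1).
import Mathlib
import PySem

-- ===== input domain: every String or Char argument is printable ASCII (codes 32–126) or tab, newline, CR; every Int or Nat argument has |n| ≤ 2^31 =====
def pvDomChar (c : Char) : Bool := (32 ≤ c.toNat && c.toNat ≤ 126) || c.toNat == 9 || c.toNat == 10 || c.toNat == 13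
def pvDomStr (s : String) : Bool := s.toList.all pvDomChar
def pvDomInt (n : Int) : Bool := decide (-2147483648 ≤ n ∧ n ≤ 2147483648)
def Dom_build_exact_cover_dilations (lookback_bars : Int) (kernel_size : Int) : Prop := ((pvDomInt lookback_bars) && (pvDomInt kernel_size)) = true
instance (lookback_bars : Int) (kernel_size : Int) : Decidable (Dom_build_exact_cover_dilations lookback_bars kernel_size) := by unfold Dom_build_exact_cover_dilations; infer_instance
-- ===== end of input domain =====

-- B replaces A's greedy while-loop by the closed form m = (lookback-1).bit_length() - 1:
-- the powers 2^0..2^(m-1) plus the single remainder term (objective: simpler).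

-- ===== PORT A =====
-- A's while-loop: state (remaining, d); the proof argument 1 ≤ d only justifies termination.
def pvALoop (remaining d : Int) (hd : 1 ≤ d) : List Int :=
  if h : remaining > 0 then
    if d < remaining then
      d :: pvALoop (remaining - d) (d * 2) (by omega)
    else [remaining]
  else []
termination_by remaining.toNat
decreasing_by omega

def build_exact_cover_dilations (lookback_bars : Int) (kernel_size : Int) : List Int :=
  if kernel_size ≠ 2 then []        -- Python raises ValueError here (excluded by Pre_)
  else if lookback_bars < 2 then [] -- Python raises ValueError here (excluded by Pre_)
  else pvALoop (lookback_bars - 1) 1 (by omega)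

-- ===== PORT B =====
def build_exact_cover_dilations_alt (lookback_bars : Int) (kernel_size : Int) : List Int :=
  if kernel_size ≠ 2 then []        -- Python raises ValueError here (excluded by Pre_)
  else if lookback_bars < 2 then [] -- Python raises ValueError here (excluded by Pre_)
  else
    let R : Int := lookback_bars - 1
    let m : Nat := Nat.log2 R.toNat   -- = R.bit_length() - 1 for R ≥ 1
    (List.range m).map (fun i => (2:Int) ^ i) ++ [R - ((2:Int) ^ m - 1)]

-- ===== PRECONDITION & SPEC =====
-- Pre_ excludes exactly the inputs on which A raises ValueError (kernel_size ≠ 2 or lookback_bars < 2).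
def Pre_build_exact_cover_dilations (lookback_bars : Int) (kernel_size : Int) : Prop :=
  kernel_size = 2 ∧ 2 ≤ lookback_bars
instance (lookback_bars : Int) (kernel_size : Int) : Decidable (Pre_build_exact_cover_dilations lookback_bars kernel_size) := by unfold Pre_build_exact_cover_dilations; infer_instance
def pvWitness_build_exact_cover_dilations : Int × Int := (100, 2)

def Spec_build_exact_cover_dilations (lookback_bars : Int) (kernel_size : Int) (out : List Int) : Prop := out = build_exact_cover_dilations_alt lookback_bars kernel_size
instance (lookback_bars : Int) (kernel_size : Int) (out : List Int) : Decidable (Spec_build_exact_cover_dilations lookback_bars kernel_size out) := by unfold Spec_build_exact_cover_dilations; infer_instance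

-- ===== CLAIM (what is proved, stated in full; the proofs are below) =====
def Claim_equal_build_exact_cover_dilations : Prop := ∀ (lookback_bars : Int) (kernel_size : Int), Dom_build_exact_cover_dilations lookback_bars kernel_size → Pre_build_exact_cover_dilations lookback_bars kernel_size → Spec_build_exact_cover_dilations lookback_bars kernel_size (build_exact_cover_dilations lookback_bars kernel_size)

-- ===== LEMMAS AND PROOFS =====

lemma pvALoop_congr {r r' d d' : Int} (hr : r = r') (hdd : d = d')
    (h : 1 ≤ d) (h' : 1 ≤ d') : pvALoop r d h = pvALoop r' d' h' := by
  subst hr; subst hdd; rfl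

-- Loop invariant: after i doubling steps started from (R, 1), the state is
-- (R - (2^i - 1), 2^i); m counts the steps still to go (2^(i+m) ≤ R < 2^(i+m+1)).
lemma pvALoop_eq (m : Nat) : ∀ (i : Nat) (R : Int) (hd : (1:Int) ≤ 2 ^ i),
    2 ^ (i + m) ≤ R → R < 2 ^ (i + m + 1) →
    pvALoop (R - (2 ^ i - 1)) (2 ^ i) hd =
      (List.range m).map (fun j => (2:Int) ^ (i + j)) ++ [R - (2 ^ (i + m) - 1)] := by
  induction m with
  | zero =>
      intro i R hd h1 h2
      rw [pvALoop]
      have h2' : R < 2 ^ i * 2 := by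
        have : (2:Int) ^ (i + 0 + 1) = 2 ^ i * 2 := by rw [Nat.add_zero, pow_succ]
        omega
      have h1' : (2:Int) ^ i ≤ R := by simpa using h1
      rw [dif_pos (by omega), if_neg (by omega)]
      simp
  | succ m ih =>
      intro i R hd h1 h2
      have hpow : (2:Int) ^ (i + 1) = 2 ^ i * 2 := pow_succ 2 i
      have hle : (2:Int) ^ (i + 1) ≤ 2 ^ (i + (m + 1)) := by
        apply pow_le_pow_right₀ (by norm_num); omega
      rw [pvALoop]
      rw [dif_pos (by omega), if_pos (by omega)]
      have e1 : R - (2 ^ i - 1) - 2 ^ i = R - ((2:Int) ^ (i + 1) - 1) := by rw [hpow]; ring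
      have e2 : (2:Int) ^ i * 2 = 2 ^ (i + 1) := hpow.symm
      rw [pvALoop_congr e1 e2 _ (by rw [hpow]; omega),
          ih (i + 1) R (by rw [hpow]; omega)
            (by rw [show i + 1 + m = i + (m + 1) by omega]; exact h1)
            (by rw [show i + 1 + m + 1 = i + (m + 1) + 1 by omega]; exact h2)]
      rw [List.range_succ_eq_map]
      simp [List.map_map, Function.comp_def, pow_succ, pow_add]
      exact ⟨fun _ _ => by ring, by ring⟩

-- ===== VERDICT (by name: the statement is the Claim_ definition above) =====
theorem build_exact_cover_dilations_spec : Claim_equal_build_exact_cover_dilations := by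
  intro lookback_bars kernel_size _ hpre
  obtain ⟨hk, hlb⟩ := hpre
  unfold Spec_build_exact_cover_dilations build_exact_cover_dilations build_exact_cover_dilations_alt
  subst hk
  rw [if_neg (by simp), if_neg (by omega), if_neg (by simp), if_neg (by omega)]
  set R : Int := lookback_bars - 1 with hR
  have hR1 : 1 ≤ R := by omega
  set m : Nat := Nat.log2 R.toNat with hm
  have hne : R.toNat ≠ 0 := by omega
  have hlo : 2 ^ m ≤ R.toNat := Nat.log2_self_le hne
  have hhi : R.toNat < 2 ^ (m + 1) := Nat.lt_log2_self
  have hloI : (2:Int) ^ (0 + m) ≤ R := by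
    rw [Nat.zero_add]
    calc (2:Int) ^ m = ((2 ^ m : Nat) : Int) := by push_cast; ring
    _ ≤ (R.toNat : Int) := by exact_mod_cast hlo
    _ = R := by omega
  have hhiI : R < 2 ^ (0 + m + 1) := by
    rw [Nat.zero_add]
    calc R = (R.toNat : Int) := by omega
    _ < ((2 ^ (m + 1) : Nat) : Int) := by exact_mod_cast hhi
    _ = 2 ^ (m + 1) := by push_cast; ring
  have := pvALoop_eq m 0 R (by norm_num) hloI hhiI
  simpa using this
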